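-- pv_equiv track=rewrite | github.com/khemale3x3/Website-Analyzer-with-notes.txt | complete_website_analyzer.py | _select_primary_maps_link
-- ===== SOURCE A (Python) =====
-- from typing import Dict, List, Optional, Tuple, Any, Set
--
-- def _select_primary_maps_link(maps_links: List[str]) -> str:
--     """Select the primary Google Maps link from available options"""
--     if not maps_links:
--         return ""
--
--     # Priority order: direct links > iframe embeds > JavaScript > generated
--     priority_patterns = [
--         'maps.google.com/place/',  # Specific place
--         'google.com/maps/place/',  # Specific place
--         'maps.google.com/dir/',    # Directions
--         'google.com/maps/dir/',    # Directions
--         'maps.google.com',         # General maps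
--         'google.com/maps',         # General maps
--     ]
--
--     for pattern in priority_patterns:
--         for link in maps_links:
--             if pattern in link.lower():
--                 return link
--
--     # Return first available link if no priority match
--     return maps_links[0]
-- ===== SOURCE B (Python) =====
-- def _select_primary_maps_link(maps_links):
--     """Select the primary Google Maps link from available options"""
--     if not maps_links:
--         return ""
--
--     priority_patterns = [
--         'maps.google.com/place/',
--         'google.com/maps/place/',
--         'maps.google.com/dir/',
--         'google.com/maps/dir/',
--         'maps.google.com',
--         'google.com/maps',
--     ]
--
--     def rank(link):
--         low = link.lower()
--         for i, pattern in enumerate(priority_patterns):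
--             if pattern in low:
--                 return i
--         return len(priority_patterns)
--
--     # min is first-wins on ties, so the earliest link of best priority is chosen;
--     # if nothing matches, every rank is equal and min returns maps_links[0].
--     return min(maps_links, key=rank)
-- ===== Notes on version B (the rewrite author's own statement) =====
-- stated objective: idiomatic
-- what changed: Instead of A's pattern-major nested scan with early return, B ranks each link once by the index of its first matching pattern and returns min(maps_links, key=rank), relying on min's first-wins tie-break.
import Mathlib
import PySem

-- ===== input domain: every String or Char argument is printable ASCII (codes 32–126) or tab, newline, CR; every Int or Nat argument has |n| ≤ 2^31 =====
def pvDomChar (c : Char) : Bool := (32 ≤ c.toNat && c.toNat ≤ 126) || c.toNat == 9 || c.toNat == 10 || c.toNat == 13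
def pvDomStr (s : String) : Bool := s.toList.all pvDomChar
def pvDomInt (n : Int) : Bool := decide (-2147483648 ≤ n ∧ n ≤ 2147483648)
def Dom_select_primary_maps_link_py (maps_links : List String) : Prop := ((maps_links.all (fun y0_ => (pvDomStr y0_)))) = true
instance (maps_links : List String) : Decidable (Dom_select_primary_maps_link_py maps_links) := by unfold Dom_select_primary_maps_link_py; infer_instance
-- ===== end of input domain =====

-- B replaces A's pattern-major nested scan (early return) by a single min over links keyed
-- by each link's best pattern index (objective: idiomatic, same cost).

-- the local constant priority_patterns (shared data of both sources)
def pvPriorityPatterns : List String :=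
  ["maps.google.com/place/", "google.com/maps/place/", "maps.google.com/dir/",
   "google.com/maps/dir/", "maps.google.com", "google.com/maps"]

-- ===== PORT A =====
-- outer loop over patterns = findSome?; inner loop over links with early return = find?
def select_primary_maps_link_py (maps_links : List String) : String :=
  match maps_links with
  | [] => ""
  | h :: _ =>
    match pvPriorityPatterns.findSome?
        (fun pattern => maps_links.find?
          (fun link => PySem.Str.isIn pattern (PySem.Str.lower link))) with
    | some link => link
    | none => h      -- maps_links[0]; in range since maps_links is nonempty here

-- ===== PORT B =====
-- rank(link): 'for i, pattern in enumerate(...): if pattern in low: return i / return len' = findIdx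
def pvRank (link : String) : Nat :=
  pvPriorityPatterns.findIdx (fun pattern => PySem.Str.isIn pattern (PySem.Str.lower link))

def select_primary_maps_link_py_alt (maps_links : List String) : String :=
  match maps_links with
  | [] => ""
  | _ :: _ => (PySem.List.min? maps_links pvRank).getD ""   -- min(maps_links, key=rank), nonempty

-- ===== PRECONDITION & SPEC =====
def Spec_select_primary_maps_link_py (maps_links : List String) (out : String) : Prop := out = select_primary_maps_link_py_alt maps_links
instance (maps_links : List String) (out : String) : Decidable (Spec_select_primary_maps_link_py maps_links out) := by unfold Spec_select_primary_maps_link_py; infer_instance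

-- ===== CLAIM (what is proved, stated in full; the proofs are below) =====
def Claim_equal_select_primary_maps_link_py : Prop := ∀ (maps_links : List String), Dom_select_primary_maps_link_py maps_links → Spec_select_primary_maps_link_py maps_links (select_primary_maps_link_py maps_links)

-- ===== LEMMAS AND PROOFS =====

-- running minimum value of f over a list, from a seed
def pvMv {α : Type} (f : α → Nat) (a : Nat) (t : List α) : Nat :=
  t.foldl (fun acc x => min acc (f x)) a

theorem pvMv_zero {α : Type} (f : α → Nat) (t : List α) : pvMv f 0 t = 0 := by
  induction t with
  | nil => rfl
  | cons x t ih =>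
    show pvMv f (min 0 (f x)) t = 0
    rw [Nat.zero_min]
    exact ih

theorem pvMv_le_seed {α : Type} (f : α → Nat) (a : Nat) (t : List α) : pvMv f a t ≤ a := by
  induction t generalizing a with
  | nil => simp [pvMv]
  | cons x t ih =>
    calc pvMv f a (x :: t) = pvMv f (min a (f x)) t := rfl
      _ ≤ min a (f x) := ih _
      _ ≤ a := min_le_left _ _

theorem pvMv_le_mem {α : Type} (f : α → Nat) (a : Nat) {t : List α} {x : α}
    (hx : x ∈ t) : pvMv f a t ≤ f x := by
  induction t generalizing a with
  | nil => cases hx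
  | cons y t ih =>
    rcases List.mem_cons.mp hx with h | h
    · subst h
      calc pvMv f a (x :: t) = pvMv f (min a (f x)) t := rfl
        _ ≤ min a (f x) := pvMv_le_seed _ _ _
        _ ≤ f x := min_le_right _ _
    · exact ih _ h

theorem pvMv_add_one {α : Type} (f g : α → Nat) (a : Nat) (t : List α)
    (h : ∀ x ∈ t, g x = f x + 1) : pvMv g (a + 1) t = pvMv f a t + 1 := by
  induction t generalizing a with
  | nil => simp [pvMv]
  | cons x t ih =>
    have hx := h x (List.mem_cons_self ..)
    have hrest : ∀ y ∈ t, g y = f y + 1 := fun y hy => h y (List.mem_cons_of_mem _ hy)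
    show pvMv g (min (a + 1) (g x)) t = pvMv f (min a (f x)) t + 1
    rw [hx, show min (a + 1) (f x + 1) = min a (f x) + 1 by omega]
    exact ih _ hrest

-- find? only looks at the predicate's values on members
theorem pv_find?_congr {α : Type} (p q : α → Bool) (l : List α)
    (h : ∀ x ∈ l, p x = q x) : l.find? p = l.find? q := by
  induction l with
  | nil => rfl
  | cons x l ih =>
    rw [List.find?_cons, List.find?_cons, h x (List.mem_cons_self ..),
        ih (fun y hy => h y (List.mem_cons_of_mem _ hy))]

-- the body of B's running-minimum fold
def pvF {α : Type} (f : α → Nat) (b : α) (t : List α) : α :=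
  t.foldl (fun b x => if f x < f b then x else b) b

theorem pv_min?_go {α : Type} (f : α → Nat) (b : α) (t : List α) :
    List.foldl
      (fun acc x =>
        match acc with
        | none => some x
        | some m => if f x < f m then some x else some m)
      (some b) t = some (pvF f b t) := by
  induction t generalizing b with
  | nil => rfl
  | cons x t ih =>
    show List.foldl _ (if f x < f b then some x else some b) t
        = some (pvF f (if f x < f b then x else b) t)
    by_cases h : f x < f b
    · rw [if_pos h, if_pos h]
      exact ih x
    · rw [if_neg h, if_neg h]
      exact ih b

theorem pv_min?_cons {α : Type} (f : α → Nat) (b : α) (t : List α) :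
    PySem.List.min? (b :: t) f = some (pvF f b t) := by
  show List.foldl _ (some b) t = _
  exact pv_min?_go f b t

-- if nothing in t beats the seed, the fold keeps the seed
theorem pvF_stay {α : Type} (f : α → Nat) (b : α) (t : List α)
    (h : ∀ x ∈ t, ¬ f x < f b) : pvF f b t = b := by
  induction t with
  | nil => rfl
  | cons x t ih =>
    have hx := h x (List.mem_cons_self ..)
    show pvF f (if f x < f b then x else b) t = b
    rw [if_neg hx]
    exact ih (fun y hy => h y (List.mem_cons_of_mem _ hy))

-- the fold returns the FIRST element attaining the running minimum
theorem pvF_eq_find {α : Type} (f : α → Nat) (b : α) (t : List α) :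
    (b :: t).find? (fun e => decide (f e = pvMv f (f b) t)) = some (pvF f b t) := by
  induction t generalizing b with
  | nil => simp [pvMv, pvF]
  | cons x t ih =>
    by_cases h : f x < f b
    · -- new best: b cannot attain the minimum
      have hmv : pvMv f (f b) (x :: t) = pvMv f (f x) t := by
        show pvMv f (min (f b) (f x)) t = _
        rw [show min (f b) (f x) = f x by omega]
      have hF : pvF f b (x :: t) = pvF f x t := by
        show pvF f (if f x < f b then x else b) t = _
        rw [if_pos h]
      rw [hF, hmv]
      have hb : ¬ f b = pvMv f (f x) t := by
        have := pvMv_le_seed f (f x) t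
        omega
      rw [List.find?_cons_of_neg (by simpa using hb)]
      exact ih x
    · -- seed survives this step
      have hmv : pvMv f (f b) (x :: t) = pvMv f (f b) t := by
        show pvMv f (min (f b) (f x)) t = _
        rw [show min (f b) (f x) = f b by omega]
      have hF : pvF f b (x :: t) = pvF f b t := by
        show pvF f (if f x < f b then x else b) t = _
        rw [if_neg h]
      rw [hF, hmv]
      by_cases hb : f b = pvMv f (f b) t
      · rw [List.find?_cons_of_pos (by simpa using hb)]
        have hstay : pvF f b t = b := by
          apply pvF_stay
          intro y hy
          have := pvMv_le_mem f (f b) hy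
          omega
        rw [hstay]
      · have hmvlt : pvMv f (f b) t < f b :=
          Nat.lt_of_le_of_ne (pvMv_le_seed f (f b) t) (fun he => hb he.symm)
        have hx : ¬ f x = pvMv f (f b) t := by omega
        rw [List.find?_cons_of_neg (by simpa using hb),
            List.find?_cons_of_neg (by simpa using hx)]
        have hIH := ih b
        rwa [List.find?_cons_of_neg (by simpa using hb)] at hIH

-- rank of a link relative to a pattern list
def pvRk (ps : List String) (l : String) : Nat :=
  ps.findIdx (fun p => PySem.Str.isIn p (PySem.Str.lower l))

-- A's nested loop over a pattern list = "first link attaining the minimal rank"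
theorem pv_main (ps : List String) (h : String) (t : List String) :
    (match ps.findSome?
        (fun pattern => (h :: t).find?
          (fun link => PySem.Str.isIn pattern (PySem.Str.lower link))) with
     | some link => link
     | none => h)
    = ((h :: t).find? (fun e => decide (pvRk ps e = pvMv (pvRk ps) (pvRk ps h) t))).getD h := by
  induction ps generalizing h t with
  | nil =>
    simp [pvRk, pvMv_zero, List.find?]
  | cons p ps ih =>
    have hrk : ∀ l, pvRk (p :: ps) l =
        if PySem.Str.isIn p (PySem.Str.lower l) = true then 0 else pvRk ps l + 1 := by
      intro l
      show List.findIdx _ (p :: ps) = _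
      rw [List.findIdx_cons]
      by_cases hq : PySem.Str.isIn p (PySem.Str.lower l) = true
      · rw [if_pos hq, hq]
        rfl
      · rw [if_neg hq, Bool.eq_false_iff.mpr hq]
        rfl
    cases hex : (h :: t).find? (fun link => PySem.Str.isIn p (PySem.Str.lower link)) with
    | some l0 =>
      -- some link matches the first pattern: minimal rank is 0, and both sides return the
      -- first link matching that pattern
      have hl0 := List.find?_some hex
      have hl0mem := List.mem_of_find?_eq_some hex
      have hr0 : pvRk (p :: ps) l0 = 0 := by rw [hrk, if_pos hl0]
      have hmv0 : pvMv (pvRk (p :: ps)) (pvRk (p :: ps) h) t = 0 := by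
        rcases List.mem_cons.mp hl0mem with hm | hm
        · have := pvMv_le_seed (pvRk (p :: ps)) (pvRk (p :: ps) h) t
          rw [hm] at hr0
          omega
        · have := pvMv_le_mem (pvRk (p :: ps)) (pvRk (p :: ps) h) hm
          omega
      have hpred : ((h :: t).find? (fun e => decide (pvRk (p :: ps) e =
            pvMv (pvRk (p :: ps)) (pvRk (p :: ps) h) t)))
          = (h :: t).find? (fun link => PySem.Str.isIn p (PySem.Str.lower link)) := by
        apply pv_find?_congr
        intro e _
        rw [hmv0, hrk]
        by_cases hq : PySem.Str.isIn p (PySem.Str.lower e) = true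
        · rw [if_pos hq, hq]
          rfl
        · rw [if_neg hq, Bool.eq_false_iff.mpr hq]
          rfl
      rw [List.findSome?_cons, hex, hpred, hex]
      rfl
    | none =>
      -- no link matches the first pattern: every link's rank is its ps-rank plus one; recurse
      have hnom : ∀ l ∈ h :: t, PySem.Str.isIn p (PySem.Str.lower l) = false := by
        intro l hl
        exact Bool.eq_false_iff.mpr (List.find?_eq_none.mp hex l hl)
      have hplus : ∀ l ∈ h :: t, pvRk (p :: ps) l = pvRk ps l + 1 := by
        intro l hl
        rw [hrk]
        simp only [hnom l hl, Bool.false_eq_true, if_false]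
      have hmv : pvMv (pvRk (p :: ps)) (pvRk (p :: ps) h) t
          = pvMv (pvRk ps) (pvRk ps h) t + 1 := by
        rw [hplus h (List.mem_cons_self ..)]
        exact pvMv_add_one (pvRk ps) (pvRk (p :: ps)) (pvRk ps h) t
          (fun x hx => hplus x (List.mem_cons_of_mem _ hx))
      have hpred : (h :: t).find? (fun e => decide (pvRk (p :: ps) e =
            pvMv (pvRk (p :: ps)) (pvRk (p :: ps) h) t))
          = (h :: t).find? (fun e => decide (pvRk ps e = pvMv (pvRk ps) (pvRk ps h) t)) := by
        apply pv_find?_congr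
        intro x hx
        rw [hmv, hplus x hx]
        simp
      rw [List.findSome?_cons, hex, hpred]
      exact ih h t

-- ===== VERDICT (by name: the statement is the Claim_ definition above) =====
theorem select_primary_maps_link_py_spec : Claim_equal_select_primary_maps_link_py := by
  intro maps_links _
  unfold Spec_select_primary_maps_link_py
  cases maps_links with
  | nil => rfl
  | cons h t =>
    show (match pvPriorityPatterns.findSome?
        (fun pattern => (h :: t).find?
          (fun link => PySem.Str.isIn pattern (PySem.Str.lower link))) with
      | some link => link
      | none => h) = (PySem.List.min? (h :: t) pvRank).getD ""
    rw [pv_min?_cons, Option.getD_some]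
    have hrank : pvRank = pvRk pvPriorityPatterns := rfl
    rw [pv_main pvPriorityPatterns h t, hrank, pvF_eq_find (pvRk pvPriorityPatterns) h t,
        Option.getD_some]
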